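-- pv_equiv track=rewrite | github.com/volesen/kys | api/chalicelib/verification/__init__.py | needles_in_haystack
-- ===== SOURCE A (Python) =====
-- def needles_in_haystack(needles, haystack):
--     for needle in needles:
--         for text in haystack["TextDetections"]:
--             if needle in text["DetectedText"] and text["Type"] == "LINE":
--                 break
--         else:
--             return False
--
--     return True
-- ===== SOURCE B (Python) =====
-- def needles_in_haystack(needles, haystack):
--     # Single pass over the detections, maintaining the set of not-yet-matched
--     # needle indices; done as soon as it is empty.
--     remaining = list(range(len(needles)))
--     if not remaining:
--         return True
--     for text in haystack["TextDetections"]: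
--         if text["Type"] == "LINE":
--             line = text["DetectedText"]
--             remaining = [i for i in remaining if needles[i] not in line]
--             if not remaining:
--                 return True
--     return False
-- ===== Notes on version B (the rewrite author's own statement) =====
-- stated objective: alternative
-- what changed: B inverts the loop nesting: one pass over the detections maintaining a shrinking list of unmatched needle indices (returning True as soon as it empties), instead of A's per-needle rescan of the whole detection list with for-else.
-- outside the precondition, e.g. on needles_in_haystack(['a'], {'TextDetections': [{'DetectedText': 'Type'}]}): A returns False, B raises KeyError
import Mathlib
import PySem

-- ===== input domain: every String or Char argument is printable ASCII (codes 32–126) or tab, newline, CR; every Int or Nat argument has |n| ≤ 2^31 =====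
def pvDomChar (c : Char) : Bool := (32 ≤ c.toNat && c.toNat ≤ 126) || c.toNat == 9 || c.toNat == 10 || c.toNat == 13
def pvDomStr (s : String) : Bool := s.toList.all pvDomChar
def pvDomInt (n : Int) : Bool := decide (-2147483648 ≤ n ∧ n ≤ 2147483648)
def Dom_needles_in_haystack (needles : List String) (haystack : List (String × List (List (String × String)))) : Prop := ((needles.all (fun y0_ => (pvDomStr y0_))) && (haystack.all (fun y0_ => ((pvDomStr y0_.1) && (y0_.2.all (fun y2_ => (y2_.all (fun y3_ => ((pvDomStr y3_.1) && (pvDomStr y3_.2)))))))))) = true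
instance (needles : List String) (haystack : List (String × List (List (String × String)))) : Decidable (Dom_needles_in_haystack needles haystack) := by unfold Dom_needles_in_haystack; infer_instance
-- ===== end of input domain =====

-- B inverts the loop nesting: one pass over the detections with a shrinking list of unmatched needle indices (alternative decomposition; return-value equivalence).


-- ===== PORT A =====
-- inner 'for text in …: if needle in text["DetectedText"] and text["Type"] == "LINE": break / else: return False'
-- (missing keys are excluded by Pre_, so getD with a default is exact there)
def pvFoundA (needle : String) (texts : List (List (String × String))) : Bool :=
  match texts with
  | [] => false
  | t :: rest =>
    if PySem.Str.isIn needle ((PySem.Dict.mk t).getD "DetectedText" "") &&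
       ((PySem.Dict.mk t).getD "Type" "" == "LINE") then true
    else pvFoundA needle rest

def pvLoopA (needles : List String) (texts : List (List (String × String))) : Bool :=
  match needles with
  | [] => true
  | n :: rest => if pvFoundA n texts then pvLoopA rest texts else false

def needles_in_haystack (needles : List String) (haystack : List (String × List (List (String × String)))) : Bool :=
  pvLoopA needles ((PySem.Dict.mk haystack).getD "TextDetections" [])

-- ===== PORT B =====
-- single pass over the detections; 'remaining' holds the indices of needles not yet matched
def pvLoopB (needles : List String) (remaining : List Nat) (texts : List (List (String × String))) : Bool :=
  match texts with
  | [] => false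
  | t :: rest =>
    if (PySem.Dict.mk t).getD "Type" "" == "LINE" then
      let line := (PySem.Dict.mk t).getD "DetectedText" ""
      let remaining' := remaining.filter (fun i => !(PySem.Str.isIn (needles.getD i "") line))
      if remaining'.isEmpty then true else pvLoopB needles remaining' rest
    else pvLoopB needles remaining rest

def needles_in_haystack_alt (needles : List String) (haystack : List (String × List (List (String × String)))) : Bool :=
  let remaining := List.range needles.length
  if remaining.isEmpty then true
  else pvLoopB needles remaining ((PySem.Dict.mk haystack).getD "TextDetections" [])

-- ===== PRECONDITION & SPEC =====
-- Pre_ excludes haystacks (with nonempty needles) missing the "TextDetections" key or containing a text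
-- detection missing "DetectedText" or "Type": on such inputs A may still return a value via short-circuit,
-- while B's detection-driven pass raises KeyError.
def Pre_needles_in_haystack (needles : List String) (haystack : List (String × List (List (String × String)))) : Prop :=
  needles = [] ∨
  ((PySem.Dict.mk haystack).contains "TextDetections" = true ∧
   ∀ t ∈ (PySem.Dict.mk haystack).getD "TextDetections" [],
     (PySem.Dict.mk t).contains "DetectedText" = true ∧ (PySem.Dict.mk t).contains "Type" = true)
instance (needles : List String) (haystack : List (String × List (List (String × String)))) : Decidable (Pre_needles_in_haystack needles haystack) := by unfold Pre_needles_in_haystack; infer_instance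

def pvWitness_needles_in_haystack : List String × (List (String × List (List (String × String)))) :=
  (["ab"], [("TextDetections", [[("DetectedText", "xaby"), ("Type", "LINE")]])])

def Spec_needles_in_haystack (needles : List String) (haystack : List (String × List (List (String × String)))) (out : Bool) : Prop := out = needles_in_haystack_alt needles haystack
instance (needles : List String) (haystack : List (String × List (List (String × String)))) (out : Bool) : Decidable (Spec_needles_in_haystack needles haystack out) := by unfold Spec_needles_in_haystack; infer_instance

-- ===== CLAIM (what is proved, stated in full; the proofs are below) =====
def Claim_equal_needles_in_haystack : Prop := ∀ (needles : List String) (haystack : List (String × List (List (String × String)))), Dom_needles_in_haystack needles haystack → Pre_needles_in_haystack needles haystack → Spec_needles_in_haystack needles haystack (needles_in_haystack needles haystack)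

-- ===== LEMMAS AND PROOFS =====

-- A's inner for/break loop, on a cons cell.
theorem pvFoundA_cons (needle : String) (t : List (String × String)) (rest : List (List (String × String))) :
    pvFoundA needle (t :: rest) =
      if PySem.Str.isIn needle ((PySem.Dict.mk t).getD "DetectedText" "") &&
         ((PySem.Dict.mk t).getD "Type" "" == "LINE") then true
      else pvFoundA needle rest := rfl

-- pointwise-equal predicates give equal 'all'.
theorem pvAllExt (l : List Nat) (f g : Nat → Bool) (h : ∀ i ∈ l, f i = g i) : l.all f = l.all g := by
  induction l with
  | nil => rfl
  | cons a l ih =>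
    simp only [List.all_cons, h a (List.mem_cons_self), ih (fun i hi => h i (List.mem_cons_of_mem a hi))]

-- 'all' over the kept part of a filter, as an 'all' over the whole list.
theorem pvAllFilterNot (l : List Nat) (q g : Nat → Bool) :
    (l.filter (fun i => !(q i))).all g = l.all (fun i => if q i then true else g i) := by
  induction l with
  | nil => rfl
  | cons a l ih => cases hqa : q a <;> simp [hqa, ih]

-- B's single pass agrees with "every remaining index is eventually found" (for nonempty remaining).
theorem pvLoopB_eq_all (needles : List String) (texts : List (List (String × String)))
    (remaining : List Nat) (hne : remaining ≠ []) :
    pvLoopB needles remaining texts =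
      remaining.all (fun i => pvFoundA (needles.getD i "") texts) := by
  induction texts generalizing remaining with
  | nil =>
    cases remaining with
    | nil => exact absurd rfl hne
    | cons i r => simp [pvLoopB, pvFoundA]
  | cons t rest ih =>
    by_cases hty : ((PySem.Dict.mk t).getD "Type" "" == "LINE") = true
    · simp only [pvLoopB, hty, if_true]
      by_cases hemp : ((remaining.filter (fun i => !(PySem.Str.isIn (needles.getD i "") ((PySem.Dict.mk t).getD "DetectedText" "")))).isEmpty) = true
      · rw [if_pos hemp]
        symm
        rw [List.all_eq_true]
        intro i hi
        rw [pvFoundA_cons]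
        have hin : PySem.Str.isIn (needles.getD i "") ((PySem.Dict.mk t).getD "DetectedText" "") = true := by
          by_contra hno
          have hmem : i ∈ remaining.filter (fun i => !(PySem.Str.isIn (needles.getD i "") ((PySem.Dict.mk t).getD "DetectedText" ""))) := by
            rw [List.mem_filter]
            exact ⟨hi, by rw [Bool.eq_false_iff.mpr hno]; rfl⟩
          rw [List.isEmpty_iff.mp hemp] at hmem
          exact absurd hmem (List.not_mem_nil)
        rw [hin, hty]
        rfl
      · rw [if_neg hemp]
        have hne' : remaining.filter (fun i => !(PySem.Str.isIn (needles.getD i "") ((PySem.Dict.mk t).getD "DetectedText" ""))) ≠ [] := by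
          intro h
          exact hemp (by rw [h]; rfl)
        rw [ih _ hne', pvAllFilterNot]
        apply pvAllExt
        intro i _
        rw [pvFoundA_cons]
        cases hin : PySem.Str.isIn (needles.getD i "") ((PySem.Dict.mk t).getD "DetectedText" "") <;>
          simp [hty]
    · have hty' : ((PySem.Dict.mk t).getD "Type" "" == "LINE") = false := by
        exact Bool.eq_false_iff.mpr (fun h => hty h)
      have hstep : pvLoopB needles remaining (t :: rest) = pvLoopB needles remaining rest := by
        simp [pvLoopB, hty']
      rw [hstep, ih remaining hne]
      apply pvAllExt
      intro i _
      rw [pvFoundA_cons]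
      simp [hty']

-- A's outer loop is all-over-needles.
theorem pvLoopA_eq_all (needles : List String) (texts : List (List (String × String))) :
    pvLoopA needles texts = needles.all (fun n => pvFoundA n texts) := by
  induction needles with
  | nil => rfl
  | cons n rest ih =>
    simp only [pvLoopA, List.all_cons, ih]
    by_cases h : pvFoundA n texts = true <;> simp [h]

-- all over a list = all over its index range.
theorem all_eq_all_range (needles : List String) (f : String → Bool) :
    needles.all f = (List.range needles.length).all (fun i => f (needles.getD i "")) := by
  induction needles with
  | nil => rfl
  | cons n rest ih =>
    rw [List.length_cons, List.range_succ_eq_map]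
    simp only [List.all_cons, List.all_map]
    rw [ih]
    rfl

-- ===== VERDICT (by name: the statement is the Claim_ definition above) =====
theorem needles_in_haystack_spec : Claim_equal_needles_in_haystack := by
  intro needles haystack _ _
  unfold Spec_needles_in_haystack needles_in_haystack needles_in_haystack_alt
  cases needles with
  | nil => rfl
  | cons n rest =>
    have hne : List.range (n :: rest).length ≠ [] := by simp
    rw [if_neg (by simp)]
    rw [pvLoopB_eq_all _ _ _ hne, pvLoopA_eq_all, all_eq_all_range]
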